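-- pv_equiv track=rewrite | github.com/mabo1215/BodhiPromptShield | src/experiments/adversarial_robustness_suite.py | _recovered_gold_spans
-- ===== SOURCE A (Python) =====
-- def _recovered_gold_spans(predicted: list[tuple[int, int]], gold: list[tuple[int, int]]) -> int:
--     recovered = 0
--     for gold_start, gold_end in gold:
--         for pred_start, pred_end in predicted:
--             overlap = max(0, min(gold_end, pred_end) - max(gold_start, pred_start))
--             if overlap > 0:
--                 recovered += 1
--                 break
--     return recovered
-- ===== SOURCE B (Python) =====
-- def _bisect_left(a, x):
--     lo, hi = 0, len(a)
--     while lo < hi: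
--         mid = (lo + hi) // 2
--         if a[mid] < x:
--             lo = mid + 1
--         else:
--             hi = mid
--     return lo
--
--
-- def _recovered_gold_spans(predicted: list[tuple[int, int]], gold: list[tuple[int, int]]) -> int:
--     # Merge the (non-empty) predicted spans into disjoint sorted intervals,
--     # then answer each gold span with one binary search.
--     spans = sorted((p for p in predicted if p[0] < p[1]), key=lambda t: t[0])
--     merged = []
--     for s, e in spans:
--         if merged and s <= merged[-1][1]:
--             if merged[-1][1] < e:
--                 merged[-1] = (merged[-1][0], e)
--         else:
--             merged.append((s, e))
--     starts = [m[0] for m in merged]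
--     ends = [m[1] for m in merged]
--     recovered = 0
--     for gs, ge in gold:
--         if gs < ge:
--             i = _bisect_left(starts, ge)
--             if i > 0 and gs < ends[i - 1]:
--                 recovered += 1
--     return recovered
-- ===== Notes on version B (the rewrite author's own statement) =====
-- stated objective: faster
-- what changed: Instead of scanning all predicted spans for every gold span, B merges the non-empty predicted spans into disjoint sorted intervals once and answers each gold span with a single binary search over the merged starts.
import Mathlib
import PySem

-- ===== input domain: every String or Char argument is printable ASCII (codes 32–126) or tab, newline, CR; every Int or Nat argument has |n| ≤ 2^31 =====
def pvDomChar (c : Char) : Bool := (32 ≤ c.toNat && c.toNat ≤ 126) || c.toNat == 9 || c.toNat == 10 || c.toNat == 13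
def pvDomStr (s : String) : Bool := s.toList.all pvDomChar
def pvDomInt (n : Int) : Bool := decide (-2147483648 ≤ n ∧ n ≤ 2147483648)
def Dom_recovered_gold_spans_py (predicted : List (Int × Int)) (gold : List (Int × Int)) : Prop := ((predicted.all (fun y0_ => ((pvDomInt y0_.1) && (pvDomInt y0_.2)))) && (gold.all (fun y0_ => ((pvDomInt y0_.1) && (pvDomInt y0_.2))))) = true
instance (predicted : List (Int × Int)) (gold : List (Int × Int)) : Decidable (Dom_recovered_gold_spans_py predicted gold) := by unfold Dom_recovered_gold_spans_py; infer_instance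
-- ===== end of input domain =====

-- B merges the non-empty predicted spans into disjoint sorted intervals once and answers each
-- gold span with one binary search (objective: faster).

-- ===== PORT A =====
-- inner 'for pred_start, pred_end in predicted: … break' loop of A: contribution of one gold span
def pvInnerA (g : Int × Int) : List (Int × Int) → Int
  | [] => 0
  | p :: rest =>
      let overlap := max 0 (min g.2 p.2 - max g.1 p.1)
      if overlap > 0 then 1 else pvInnerA g rest

def recovered_gold_spans_py (predicted : List (Int × Int)) (gold : List (Int × Int)) : Int :=
  gold.foldl (fun recovered g => recovered + pvInnerA g predicted) 0

-- ===== PORT B =====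
-- the 'for s, e in spans' merge loop of Source B (merged[-1] / merged.append on the running list)
def pvMergeLoop : List (Int × Int) → List (Int × Int) → List (Int × Int)
  | merged, [] => merged
  | merged, (s, e) :: rest =>
      match merged.getLast? with
      | some (ms, me) =>
          if s ≤ me then
            pvMergeLoop (if me < e then merged.dropLast ++ [(ms, e)] else merged) rest
          else
            pvMergeLoop (merged ++ [(s, e)]) rest
      | none => pvMergeLoop (merged ++ [(s, e)]) rest

-- Source B's hand-written _bisect_left is exactly CPython's bisect_left loop = PySem.List.bisectLeft
def recovered_gold_spans_py_alt (predicted : List (Int × Int)) (gold : List (Int × Int)) : Int :=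
  let spans := PySem.List.sorted (predicted.filter (fun p => p.1 < p.2)) (fun t => t.1) false
  let merged := pvMergeLoop [] spans
  let starts := merged.map (fun m => m.1)
  let ends := merged.map (fun m => m.2)
  gold.foldl (fun recovered g =>
    if g.1 < g.2 then
      let i := PySem.List.bisectLeft starts g.2
      if 0 < i ∧ g.1 < ends.getD (i - 1) 0 then recovered + 1 else recovered
    else recovered) 0

-- ===== PRECONDITION & SPEC =====
def Spec_recovered_gold_spans_py (predicted : List (Int × Int)) (gold : List (Int × Int)) (out : Int) : Prop := out = recovered_gold_spans_py_alt predicted gold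
instance (predicted : List (Int × Int)) (gold : List (Int × Int)) (out : Int) : Decidable (Spec_recovered_gold_spans_py predicted gold out) := by unfold Spec_recovered_gold_spans_py; infer_instance

-- ===== CLAIM (what is proved, stated in full; the proofs are below) =====
def Claim_equal_recovered_gold_spans_py : Prop := ∀ (predicted : List (Int × Int)) (gold : List (Int × Int)), Dom_recovered_gold_spans_py predicted gold → Spec_recovered_gold_spans_py predicted gold (recovered_gold_spans_py predicted gold)

-- ===== LEMMAS AND PROOFS =====

-- 'g and m overlap with positive length' for non-empty g and m
abbrev pvTouch (g m : Int × Int) : Prop := g.1 < m.2 ∧ m.1 < g.2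

lemma pvMergeLoop_nil (acc : List (Int × Int)) : pvMergeLoop acc [] = acc := rfl

lemma pvMergeLoop_cons_nil (s e : Int) (rest : List (Int × Int)) :
    pvMergeLoop [] ((s, e) :: rest) = pvMergeLoop [(s, e)] rest := rfl

lemma pvMergeLoop_cons_concat (init : List (Int × Int)) (ms me s e : Int) (rest : List (Int × Int)) :
    pvMergeLoop (init ++ [(ms, me)]) ((s, e) :: rest) =
      if s ≤ me then
        pvMergeLoop (if me < e then init ++ [(ms, e)] else init ++ [(ms, me)]) rest
      else
        pvMergeLoop ((init ++ [(ms, me)]) ++ [(s, e)]) rest := by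
  simp only [pvMergeLoop, List.getLast?_concat, List.dropLast_concat]

lemma pvInnerA_eq_any (g : Int × Int) (l : List (Int × Int)) :
    pvInnerA g l = if l.any (fun p => decide (g.1 < g.2 ∧ p.1 < p.2 ∧ pvTouch g p)) then 1 else 0 := by
  induction l with
  | nil => simp [pvInnerA]
  | cons p rest ih =>
      simp only [pvInnerA, List.any_cons]
      by_cases h : max 0 (min g.2 p.2 - max g.1 p.1) > 0
      · have hd : (decide (g.1 < g.2 ∧ p.1 < p.2 ∧ pvTouch g p)) = true := by
          simp only [pvTouch, decide_eq_true_eq]; omega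
        rw [if_pos h]
        simp [hd]
      · have hd : (decide (g.1 < g.2 ∧ p.1 < p.2 ∧ pvTouch g p)) = false := by
          simp only [pvTouch, decide_eq_false_iff_not]; omega
        rw [if_neg h, ih]
        simp only [hd, Bool.false_or]

-- the merge loop preserves "g touches some interval", given starts non-decreasing
lemma pvMergeLoop_touch (g : Int × Int) (hg : g.1 < g.2) :
    ∀ (rest acc : List (Int × Int)),
      (∀ a ∈ acc, ∀ b ∈ rest, a.1 ≤ b.1) →
      rest.Pairwise (fun a b => a.1 ≤ b.1) →
      ((∃ m ∈ pvMergeLoop acc rest, pvTouch g m) ↔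
        (∃ m ∈ acc, pvTouch g m) ∨ (∃ p ∈ rest, pvTouch g p)) := by
  intro rest
  induction rest with
  | nil => intro acc _ _; rw [pvMergeLoop_nil]; simp
  | cons p rest ih =>
      intro acc hle hpw
      obtain ⟨s, e⟩ := p
      rcases List.eq_nil_or_concat acc with hnil | ⟨init, last, hacc⟩
      · subst hnil
        rw [pvMergeLoop_cons_nil]
        rw [ih [(s, e)] (by
              intro a ha b hb
              simp only [List.mem_singleton] at ha; subst ha
              exact (List.pairwise_cons.mp hpw).1 b hb)
            (List.pairwise_cons.mp hpw).2]
        constructor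
        · rintro (h1 | hr)
          · rcases h1 with ⟨m, hm, ht⟩
            simp only [List.mem_singleton] at hm; subst hm
            exact Or.inr ⟨(s, e), List.mem_cons_self, ht⟩
          · exact Or.inr (List.exists_mem_cons_of_exists hr)
        · rintro (h1 | hr)
          · exact absurd h1 (by simp)
          · obtain ⟨x, hx, hpx⟩ := hr
            rcases List.mem_cons.mp hx with rfl | hx'
            · exact Or.inl ⟨(s, e), by simp, hpx⟩
            · exact Or.inr ⟨x, hx', hpx⟩
      · obtain ⟨ms, me⟩ := last
        rw [List.concat_eq_append] at hacc
        subst hacc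
        rw [pvMergeLoop_cons_concat]
        have hms : ms ≤ s := hle (ms, me) (by simp) (s, e) (by simp)
        by_cases hs : s ≤ me
        · rw [if_pos hs]
          by_cases hupd : me < e
          · rw [if_pos hupd]
            rw [ih (init ++ [(ms, e)]) (by
                  intro a ha b hb
                  rcases List.mem_append.mp ha with h1 | h1
                  · exact hle a (List.mem_append.mpr (Or.inl h1)) b (List.mem_cons_of_mem _ hb)
                  · simp only [List.mem_singleton] at h1; subst h1
                    exact hle (ms, me) (by simp) b (List.mem_cons_of_mem _ hb))
                (List.pairwise_cons.mp hpw).2]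
            constructor
            · rintro (⟨m, hm, ht⟩ | hr)
              · rcases List.mem_append.mp hm with h1 | h1
                · exact Or.inl ⟨m, List.mem_append.mpr (Or.inl h1), ht⟩
                · simp only [List.mem_singleton] at h1; subst h1
                  rcases ht with ⟨h2, h3⟩
                  by_cases h4 : g.1 < me
                  · exact Or.inl ⟨(ms, me), by simp, h4, h3⟩
                  · refine Or.inr ⟨(s, e), by simp, h2, ?_⟩
                    simp only at h2 h3 ⊢; omega
              · exact Or.inr (List.exists_mem_cons_of_exists hr)
            · rintro (⟨m, hm, ht⟩ | hr)
              · rcases List.mem_append.mp hm with h1 | h1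
                · exact Or.inl ⟨m, List.mem_append.mpr (Or.inl h1), ht⟩
                · simp only [List.mem_singleton] at h1; subst h1
                  refine Or.inl ⟨(ms, e), by simp, ?_⟩
                  rcases ht with ⟨h2, h3⟩
                  exact ⟨by simp only at h2 ⊢; omega, h3⟩
              · obtain ⟨x, hx, hpx⟩ := hr
                rcases List.mem_cons.mp hx with rfl | hx'
                · refine Or.inl ⟨(ms, e), by simp, ?_⟩
                  rcases hpx with ⟨h2, h3⟩
                  simp only at h2 h3 ⊢
                  omega
                · exact Or.inr ⟨x, hx', hpx⟩
          · rw [if_neg hupd]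
            rw [ih (init ++ [(ms, me)]) (by
                  intro a ha b hb
                  exact hle a ha b (List.mem_cons_of_mem _ hb))
                (List.pairwise_cons.mp hpw).2]
            constructor
            · rintro (h1 | hr)
              · exact Or.inl h1
              · exact Or.inr (List.exists_mem_cons_of_exists hr)
            · rintro (h1 | hr)
              · exact Or.inl h1
              · obtain ⟨x, hx, hpx⟩ := hr
                rcases List.mem_cons.mp hx with rfl | hx'
                · refine Or.inl ⟨(ms, me), by simp, ?_⟩
                  rcases hpx with ⟨h2, h3⟩
                  simp only at h2 h3 ⊢
                  omega
                · exact Or.inr ⟨x, hx', hpx⟩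
        · rw [if_neg hs]
          rw [ih ((init ++ [(ms, me)]) ++ [(s, e)]) (by
                intro a ha b hb
                rcases List.mem_append.mp ha with h1 | h1
                · exact hle a h1 b (List.mem_cons_of_mem _ hb)
                · simp only [List.mem_singleton] at h1; subst h1
                  exact (List.pairwise_cons.mp hpw).1 b hb)
              (List.pairwise_cons.mp hpw).2]
          constructor
          · rintro (⟨m, hm, ht⟩ | hr)
            · rcases List.mem_append.mp hm with h1 | h1
              · exact Or.inl ⟨m, h1, ht⟩
              · simp only [List.mem_singleton] at h1; subst h1
                exact Or.inr ⟨(s, e), by simp, ht⟩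
            · exact Or.inr (List.exists_mem_cons_of_exists hr)
          · rintro (⟨m, hm, ht⟩ | hr)
            · exact Or.inl ⟨m, List.mem_append.mpr (Or.inl hm), ht⟩
            · obtain ⟨x, hx, hpx⟩ := hr
              rcases List.mem_cons.mp hx with rfl | hx'
              · exact Or.inl ⟨(s, e), by simp, hpx⟩
              · exact Or.inr ⟨x, hx', hpx⟩

-- the merge loop output: disjoint (strict gaps between consecutive) and non-empty intervals
lemma pvMergeLoop_good :
    ∀ (rest acc : List (Int × Int)),
      (∀ a ∈ acc, ∀ b ∈ rest, a.1 ≤ b.1) →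
      rest.Pairwise (fun a b => a.1 ≤ b.1) →
      acc.Pairwise (fun a b => a.2 < b.1) →
      (∀ a ∈ acc, a.1 < a.2) →
      (∀ b ∈ rest, b.1 < b.2) →
      (pvMergeLoop acc rest).Pairwise (fun a b => a.2 < b.1) ∧
        (∀ m ∈ pvMergeLoop acc rest, m.1 < m.2) := by
  intro rest
  induction rest with
  | nil => intro acc _ _ h3 h4 _; rw [pvMergeLoop_nil]; exact ⟨h3, h4⟩
  | cons p rest ih =>
      intro acc hle hpw hgap hne hrne
      obtain ⟨s, e⟩ := p
      have hse : s < e := hrne (s, e) (by simp)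
      rcases List.eq_nil_or_concat acc with hnil | ⟨init, last, hacc⟩
      · subst hnil
        rw [pvMergeLoop_cons_nil]
        exact ih [(s, e)]
          (by intro a ha b hb
              simp only [List.mem_singleton] at ha; subst ha
              exact (List.pairwise_cons.mp hpw).1 b hb)
          (List.pairwise_cons.mp hpw).2
          (by simp)
          (by intro a ha; simp only [List.mem_singleton] at ha; subst ha; exact hse)
          (fun b hb => hrne b (List.mem_cons_of_mem _ hb))
      · obtain ⟨ms, me⟩ := last
        rw [List.concat_eq_append] at hacc
        subst hacc
        rw [pvMergeLoop_cons_concat]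
        have hms : ms ≤ s := hle (ms, me) (by simp) (s, e) (by simp)
        have hmsme : ms < me := hne (ms, me) (by simp)
        have hinitgap : ∀ a ∈ init, a.2 < ms :=
          fun a ha => (List.pairwise_append.mp hgap).2.2 a ha (ms, me) (by simp)
        by_cases hs : s ≤ me
        · rw [if_pos hs]
          by_cases hupd : me < e
          · rw [if_pos hupd]
            exact ih (init ++ [(ms, e)])
              (by intro a ha b hb
                  rcases List.mem_append.mp ha with h1 | h1
                  · exact hle a (List.mem_append.mpr (Or.inl h1)) b (List.mem_cons_of_mem _ hb)
                  · simp only [List.mem_singleton] at h1; subst h1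
                    exact hle (ms, me) (by simp) b (List.mem_cons_of_mem _ hb))
              (List.pairwise_cons.mp hpw).2
              (by
                rw [List.pairwise_append]
                refine ⟨(List.pairwise_append.mp hgap).1, by simp, ?_⟩
                intro a ha b hb
                simp only [List.mem_singleton] at hb; subst hb
                exact hinitgap a ha)
              (by
                intro a ha
                rcases List.mem_append.mp ha with h1 | h1
                · exact hne a (List.mem_append.mpr (Or.inl h1))
                · simp only [List.mem_singleton] at h1; subst h1
                  simp only; omega)
              (fun b hb => hrne b (List.mem_cons_of_mem _ hb))
          · rw [if_neg hupd]
            exact ih (init ++ [(ms, me)])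
              (by intro a ha b hb; exact hle a ha b (List.mem_cons_of_mem _ hb))
              (List.pairwise_cons.mp hpw).2 hgap hne
              (fun b hb => hrne b (List.mem_cons_of_mem _ hb))
        · rw [if_neg hs]
          exact ih ((init ++ [(ms, me)]) ++ [(s, e)])
            (by intro a ha b hb
                rcases List.mem_append.mp ha with h1 | h1
                · exact hle a h1 b (List.mem_cons_of_mem _ hb)
                · simp only [List.mem_singleton] at h1; subst h1
                  exact (List.pairwise_cons.mp hpw).1 b hb)
            (List.pairwise_cons.mp hpw).2
            (by
              rw [List.pairwise_append]
              refine ⟨hgap, by simp, ?_⟩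
              intro a ha b hb
              simp only [List.mem_singleton] at hb; subst hb
              rcases List.mem_append.mp ha with h1 | h1
              · have := hinitgap a h1; simp only; omega
              · simp only [List.mem_singleton] at h1; subst h1
                simp only; omega)
            (by
              intro a ha
              rcases List.mem_append.mp ha with h1 | h1
              · exact hne a h1
              · simp only [List.mem_singleton] at h1; subst h1; exact hse)
            (fun b hb => hrne b (List.mem_cons_of_mem _ hb))

-- the binary-search check on a disjoint sorted interval list answers "touches some interval"
lemma pvBisect_check (merged : List (Int × Int)) (g : Int × Int)
    (hgap : merged.Pairwise (fun a b => a.2 < b.1))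
    (hne : ∀ m ∈ merged, m.1 < m.2) :
    (0 < PySem.List.bisectLeft (merged.map (fun m => m.1)) g.2 ∧
      g.1 < (merged.map (fun m => m.2)).getD (PySem.List.bisectLeft (merged.map (fun m => m.1)) g.2 - 1) 0)
      ↔ ∃ m ∈ merged, pvTouch g m := by
  have hgap' := List.pairwise_iff_getElem.mp hgap
  have hpair : (merged.map (fun m => m.1)).Pairwise (· ≤ ·) := by
    rw [List.pairwise_iff_getElem]
    intro a b ha hb hab
    simp only [List.length_map] at ha hb
    simp only [List.getElem_map]
    have h1 := hgap' a b ha hb hab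
    have h2 := hne merged[a] (merged.getElem_mem ha)
    omega
  obtain ⟨hle, hlt, hge⟩ := PySem.List.bisectLeft_spec (merged.map (fun m => m.1)) g.2 hpair
  simp only [List.length_map] at hle hlt hge
  set i := PySem.List.bisectLeft (merged.map (fun m => m.1)) g.2 with hi
  constructor
  · rintro ⟨hpos, hlt1⟩
    have hk : i - 1 < merged.length := by omega
    refine ⟨merged[i - 1], merged.getElem_mem hk, ?_, ?_⟩
    · rwa [List.getD_eq_getElem _ _ (by simpa using hk), List.getElem_map] at hlt1
    · have := hlt (i - 1) hk (by omega)
      simpa [List.getElem_map] using this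
  · rintro ⟨m, hm, ht1, ht2⟩
    obtain ⟨j, hj, hjm⟩ := List.mem_iff_getElem.mp hm
    have hji : j < i := by
      by_contra hc
      have := hge j hj (by omega)
      rw [List.getElem_map] at this
      rw [hjm] at this
      omega
    have hk : i - 1 < merged.length := by omega
    refine ⟨by omega, ?_⟩
    rw [List.getD_eq_getElem _ _ (by simpa using hk), List.getElem_map]
    rcases eq_or_lt_of_le (by omega : j ≤ i - 1) with hji' | hji'
    · subst hji'; rw [hjm]; exact ht1
    · have h1 := hgap' j (i - 1) hj hk hji'
      have h2 := hne merged[i - 1] (merged.getElem_mem hk)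
      rw [hjm] at h1
      omega

-- per gold span: A's inner loop result equals B's binary-search test
lemma pv_point (predicted : List (Int × Int)) (g : Int × Int) :
    pvInnerA g predicted =
      (let spans := PySem.List.sorted (predicted.filter (fun p => p.1 < p.2)) (fun t => t.1) false
       let merged := pvMergeLoop [] spans
       let starts := merged.map (fun m => m.1)
       let ends := merged.map (fun m => m.2)
       if g.1 < g.2 then
         let i := PySem.List.bisectLeft starts g.2
         if 0 < i ∧ g.1 < ends.getD (i - 1) 0 then (1 : Int) else 0
       else 0) := by
  rw [pvInnerA_eq_any]
  set spans := PySem.List.sorted (predicted.filter (fun p => p.1 < p.2)) (fun t => t.1) false with hsp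
  have hpw : spans.Pairwise (fun a b => a.1 ≤ b.1) := PySem.List.sorted_pairwise _ _
  have hmem : ∀ p, p ∈ spans ↔ p ∈ predicted ∧ p.1 < p.2 := by
    intro p
    rw [hsp, PySem.List.mem_sorted, List.mem_filter]
    simp
  have hrne : ∀ b ∈ spans, b.1 < b.2 := fun b hb => ((hmem b).mp hb).2
  have hgood := pvMergeLoop_good spans [] (by simp) hpw (by simp) (by simp) hrne
  by_cases hg : g.1 < g.2
  · rw [if_pos hg]
    have hiff : (0 < PySem.List.bisectLeft ((pvMergeLoop [] spans).map (fun m => m.1)) g.2 ∧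
        g.1 < ((pvMergeLoop [] spans).map (fun m => m.2)).getD
          (PySem.List.bisectLeft ((pvMergeLoop [] spans).map (fun m => m.1)) g.2 - 1) 0) ↔
        predicted.any (fun p => decide (g.1 < g.2 ∧ p.1 < p.2 ∧ pvTouch g p)) = true := by
      rw [pvBisect_check (pvMergeLoop [] spans) g hgood.1 hgood.2,
          pvMergeLoop_touch g hg spans [] (by simp) hpw, List.any_eq_true]
      constructor
      · rintro (⟨m, hm, ht⟩ | ⟨p, hp, ht⟩)
        · exact absurd hm (by simp)
        · obtain ⟨hp1, hp2⟩ := (hmem p).mp hp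
          exact ⟨p, hp1, by simp only [decide_eq_true_eq]; exact ⟨hg, hp2, ht⟩⟩
      · rintro ⟨p, hp, hd⟩
        simp only [decide_eq_true_eq] at hd
        exact Or.inr ⟨p, (hmem p).mpr ⟨hp, hd.2.1⟩, hd.2.2⟩
    by_cases hB : (0 < PySem.List.bisectLeft ((pvMergeLoop [] spans).map (fun m => m.1)) g.2 ∧
        g.1 < ((pvMergeLoop [] spans).map (fun m => m.2)).getD
          (PySem.List.bisectLeft ((pvMergeLoop [] spans).map (fun m => m.1)) g.2 - 1) 0)
    · rw [if_pos hB, hiff.mp hB]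
      simp
    · rw [if_neg hB]
      have hfalse : ¬ predicted.any (fun p => decide (g.1 < g.2 ∧ p.1 < p.2 ∧ pvTouch g p)) = true :=
        fun hc => hB (hiff.mpr hc)
      rw [if_neg hfalse]
  · rw [if_neg hg]
    have hfalse : ¬ predicted.any (fun p => decide (g.1 < g.2 ∧ p.1 < p.2 ∧ pvTouch g p)) = true := by
      rw [List.any_eq_true]
      rintro ⟨p, hp, hd⟩
      simp only [decide_eq_true_eq] at hd
      exact hg hd.1
    rw [if_neg hfalse]

lemma pv_main (predicted gold : List (Int × Int)) :
    recovered_gold_spans_py predicted gold = recovered_gold_spans_py_alt predicted gold := by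
  unfold recovered_gold_spans_py recovered_gold_spans_py_alt
  suffices h : ∀ (acc : Int),
      gold.foldl (fun recovered g => recovered + pvInnerA g predicted) acc =
      gold.foldl (fun recovered g =>
        if g.1 < g.2 then
          if 0 < PySem.List.bisectLeft ((pvMergeLoop [] (PySem.List.sorted (predicted.filter (fun p => p.1 < p.2)) (fun t => t.1) false)).map (fun m => m.1)) g.2 ∧
             g.1 < ((pvMergeLoop [] (PySem.List.sorted (predicted.filter (fun p => p.1 < p.2)) (fun t => t.1) false)).map (fun m => m.2)).getD
               (PySem.List.bisectLeft ((pvMergeLoop [] (PySem.List.sorted (predicted.filter (fun p => p.1 < p.2)) (fun t => t.1) false)).map (fun m => m.1)) g.2 - 1) 0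
          then recovered + 1 else recovered
        else recovered) acc by
    exact h 0
  induction gold with
  | nil => intro acc; rfl
  | cons g rest ih =>
      intro acc
      simp only [List.foldl_cons]
      rw [pv_point predicted g]
      simp only []
      split_ifs with h1 h2
      · rw [ih]
      · rw [ih]; norm_num
      · rw [ih]; norm_num

-- ===== VERDICT (by name: the statement is the Claim_ definition above) =====
theorem recovered_gold_spans_py_spec : Claim_equal_recovered_gold_spans_py := by
  intro predicted gold _
  show recovered_gold_spans_py predicted gold = recovered_gold_spans_py_alt predicted gold
  exact pv_main predicted gold
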